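-- pv_equiv track=rewrite | github.com/daniele21/DL_soccer_prediction_v2 | scripts/utils/utils.py | multiply_all_list_elements
-- ===== SOURCE A (Python) =====
-- def multiply_all_list_elements(input_list):
--
--     result = 1
--
--     for x in input_list:
--         if(x > 0):
--             result *= x
--         elif(x < 0):
--             result = -1
--             break
--         else:
--             raise ValueError('Multiplication element')
--
--     return result
-- ===== SOURCE B (Python) =====
-- def multiply_all_list_elements(input_list):
--     neg = next((i for i, x in enumerate(input_list) if x < 0), None)
--     prefix = input_list if neg is None else input_list[:neg]
--     result = 1
--     for x in prefix:
--         if x == 0: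
--             raise ValueError('Multiplication element')
--         result *= x
--     return -1 if neg is not None else result
-- ===== Notes on version B (the rewrite author's own statement) =====
-- stated objective: alternative
-- what changed: B first locates the index of the first negative element with a single scan, then folds a product over the prefix strictly before it (raising on zeros there), returning -1 when a negative exists; A interleaves the three cases in one loop with a break.
import Mathlib
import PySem

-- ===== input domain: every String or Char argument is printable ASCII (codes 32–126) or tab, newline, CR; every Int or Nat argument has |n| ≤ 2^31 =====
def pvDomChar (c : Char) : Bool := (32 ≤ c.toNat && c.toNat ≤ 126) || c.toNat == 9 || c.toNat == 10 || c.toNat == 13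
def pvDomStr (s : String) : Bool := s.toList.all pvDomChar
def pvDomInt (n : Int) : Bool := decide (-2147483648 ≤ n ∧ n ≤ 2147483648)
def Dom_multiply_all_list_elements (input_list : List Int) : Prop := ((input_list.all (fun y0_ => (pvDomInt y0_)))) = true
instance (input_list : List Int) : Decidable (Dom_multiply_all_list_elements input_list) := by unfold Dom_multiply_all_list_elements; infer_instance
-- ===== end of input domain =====

-- B finds the first negative's index in one scan, then folds a product over the prefix before it;
-- A interleaves the three cases in a single loop with a break.  Equivalence of return values on Pre_.

-- ===== PORT A =====
-- A's loop: multiply positives, break with -1 on a negative, raise on a zero (the zero case is outside Pre_, 0 is a dummy)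
def pvLoopA (result : Int) : List Int → Int
  | [] => result
  | x :: rest => if x > 0 then pvLoopA (result * x) rest else if x < 0 then -1 else 0

def multiply_all_list_elements (input_list : List Int) : Int := pvLoopA 1 input_list

-- ===== PORT B =====
-- B's fold over the prefix: multiply, raising on zero (the zero case is outside Pre_, 0 is a dummy)
def pvProdB (result : Int) : List Int → Int
  | [] => result
  | x :: rest => if x = 0 then 0 else pvProdB (result * x) rest

def multiply_all_list_elements_alt (input_list : List Int) : Int :=
  match input_list.findIdx? (fun x => decide (x < 0)) with
  | some _ => -1
  | none => pvProdB 1 input_list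

-- ===== PRECONDITION & SPEC =====
-- Pre_ excludes exactly the inputs with a zero before the first negative element, on which A raises ValueError.
def Pre_multiply_all_list_elements (input_list : List Int) : Prop :=
  (0 : Int) ∉ input_list.takeWhile (fun x => decide (0 ≤ x))
instance (input_list : List Int) : Decidable (Pre_multiply_all_list_elements input_list) := by
  unfold Pre_multiply_all_list_elements; infer_instance

def pvWitness_multiply_all_list_elements : List Int := [2, 3, -1, 0]

def Spec_multiply_all_list_elements (input_list : List Int) (out : Int) : Prop := out = multiply_all_list_elements_alt input_list
instance (input_list : List Int) (out : Int) : Decidable (Spec_multiply_all_list_elements input_list out) := by unfold Spec_multiply_all_list_elements; infer_instance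

-- ===== CLAIM (what is proved, stated in full; the proofs are below) =====
def Claim_equal_multiply_all_list_elements : Prop := ∀ (input_list : List Int), Dom_multiply_all_list_elements input_list → Pre_multiply_all_list_elements input_list → Spec_multiply_all_list_elements input_list (multiply_all_list_elements input_list)

-- ===== LEMMAS AND PROOFS =====
theorem pvLoopA_eq (xs : List Int) : ∀ (acc : Int),
    (0 : Int) ∉ xs.takeWhile (fun x => decide (0 ≤ x)) →
    pvLoopA acc xs = (match xs.findIdx? (fun x => decide (x < 0)) with
                      | some _ => (-1 : Int)
                      | none => pvProdB acc xs) := by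
  induction xs with
  | nil => intro acc _; simp [pvLoopA, pvProdB]
  | cons x rest ih =>
    intro acc hpre
    by_cases hx : x > 0
    · have hx0 : ¬ x < 0 := by omega
      have hpre' : (0 : Int) ∉ rest.takeWhile (fun x => decide (0 ≤ x)) := by
        simp [show (0:Int) ≤ x by omega] at hpre
        exact hpre.2
      simp [pvLoopA, pvProdB, List.findIdx?_cons, hx0, show x ≠ 0 by omega, hx,
            ih _ hpre']
      cases rest.findIdx? (fun x => decide (x < 0)) <;> simp
    · by_cases hneg : x < 0
      · simp [pvLoopA, List.findIdx?_cons, hneg, hx]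
      · exfalso
        have hz : x = 0 := by omega
        subst hz
        simp at hpre

-- ===== VERDICT (by name: the statement is the Claim_ definition above) =====
theorem multiply_all_list_elements_spec : Claim_equal_multiply_all_list_elements := by
  intro xs _ hpre
  unfold Spec_multiply_all_list_elements multiply_all_list_elements multiply_all_list_elements_alt
  exact pvLoopA_eq xs 1 hpre
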